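-- pv_equiv track=rewrite | github.com/eldad1221/Open_u_python_course | mmn12.py | max_balanced_idx
-- ===== SOURCE A (Python) =====
-- def is_balanced_idx(lst, idx):
--     """
--     Check whether a given index in a list is 'balanced'.
--
--     An index is considered balanced if:
--         sum of all elements to the left of idx ==
--         product of all elements to the right of idx.
--
--     Args:
--         lst: A list of numeric values.
--         idx: The index to check.
--
--     Returns:
--         bool: True if the index is balanced, False otherwise.
--
--     Raises:
--         IndexError: If idx is outside the valid range of indices for lst.
--     """
--     if idx < 0 or idx >= len(lst):
--         raise IndexError("Index out of bounds")
--
--     left_sum = sum_all(lst[:idx])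
--     right_prod = 1
--     for n in (lst[idx + 1:]):
--         right_prod *= n
--
--     return left_sum == right_prod
--
-- def max_balanced_idx(lst):
--     """
--     Find the maximum index in a list that is 'balanced' according to is_balanced_idx.
--
--     A balanced index is one where:
--         sum(lst[:idx]) == product(lst[idx+1:]).
--
--     Args:
--         lst: A list of numeric values.
--
--     Returns:
--         int | None: The largest balanced index if any exist, otherwise None.
--     """
--     max_idx = 0
--     try:
--         for i in range(len(lst)):
--             if is_balanced_idx(lst, i):
--                 max_idx = i
--
--     except IndexError:
--         return None
--     if max_idx:
--         return max_idx
--     else: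
--         return None
--
-- def sum_all(lst):
--     """
--     Calculate the sum of all elements in a list.
--
--     Args:
--         lst: A list of numeric values.
--
--     Returns:
--         int | float: The sum of all elements in lst.
--     """
--     total = 0
--     for num in lst:
--         total += num
--     return total
-- ===== SOURCE B (Python) =====
-- def max_balanced_idx(lst):
--     n = len(lst)
--     prefix = [0]
--     for x in lst:
--         prefix.append(prefix[-1] + x)
--     prod = 1
--     i = n - 1
--     while i > 0:
--         if prefix[i] == prod:
--             return i
--         prod *= lst[i]
--         i -= 1
--     return None
-- ===== Notes on version B (the rewrite author's own statement) =====
-- stated objective: faster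
-- what changed: Replaced the quadratic per-index slice-sum/slice-product check with one precomputed prefix-sum table and a single downward scan that maintains the running suffix product, returning at the first (= largest) balanced index > 0.
import Mathlib
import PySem

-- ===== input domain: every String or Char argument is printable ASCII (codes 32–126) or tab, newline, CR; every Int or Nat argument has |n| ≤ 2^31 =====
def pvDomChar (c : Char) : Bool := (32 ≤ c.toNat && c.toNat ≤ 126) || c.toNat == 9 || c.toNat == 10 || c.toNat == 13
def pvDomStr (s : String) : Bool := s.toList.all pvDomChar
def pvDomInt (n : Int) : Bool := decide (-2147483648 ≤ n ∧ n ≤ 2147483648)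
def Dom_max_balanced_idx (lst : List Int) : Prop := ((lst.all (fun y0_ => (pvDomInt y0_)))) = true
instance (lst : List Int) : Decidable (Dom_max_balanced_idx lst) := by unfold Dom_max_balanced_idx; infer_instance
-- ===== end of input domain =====

-- B: one precomputed prefix-sum table + a single downward scan maintaining the suffix product, instead of A's per-index slice sum/product.

-- ===== PORT A =====
-- sum_all: total = 0; for num in lst: total += num
def pvSumAll (lst : List Int) : Int := lst.foldl (fun total num => total + num) 0

-- is_balanced_idx: none = IndexError (never reached from max_balanced_idx's range loop)
def pvIsBalanced (lst : List Int) (idx : Int) : Option Bool :=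
  if idx < 0 ∨ (lst.length : Int) ≤ idx then none
  else
    let leftSum := pvSumAll (PySem.List.slice lst none (some idx))
    let rightProd := (PySem.List.slice lst (some (idx + 1)) none).foldl (fun p n => p * n) 1
    some (leftSum == rightProd)

-- the 'for i in range(len(lst))' loop with accumulator max_idx; a none from the helper is the except-path 'return None'
def pvLoopA (lst : List Int) : List Int → Int → Option Int
  | [], maxIdx => if maxIdx ≠ 0 then some maxIdx else none
  | i :: rest, maxIdx =>
    match pvIsBalanced lst i with
    | none => none
    | some b => pvLoopA lst rest (if b then i else maxIdx)

def max_balanced_idx (lst : List Int) : Option Int :=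
  pvLoopA lst (PySem.List.pyRange 0 lst.length 1) 0

-- ===== PORT B =====
-- prefix = [0]; for x in lst: prefix.append(prefix[-1] + x)   (built here by structural recursion on lst)
def pvPrefix (acc : Int) : List Int → List Int
  | [] => [acc]
  | x :: xs => acc :: pvPrefix (acc + x) xs

-- while i > 0: … ; prod *= lst[i]; i -= 1   (every index used is provably nonnegative and in range,
-- so List.getD is an exact port of Python's prefix[i] / lst[i] here)
def pvLoopB (lst pre : List Int) : Nat → Int → Option Int
  | 0, _ => none
  | j + 1, prod =>
    if pre.getD (j + 1) 0 = prod then some ((j : Int) + 1)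
    else pvLoopB lst pre j (prod * lst.getD (j + 1) 0)

def max_balanced_idx_alt (lst : List Int) : Option Int :=
  pvLoopB lst (pvPrefix 0 lst) (lst.length - 1) 1

-- ===== PRECONDITION & SPEC =====
def Spec_max_balanced_idx (lst : List Int) (out : Option Int) : Prop := out = max_balanced_idx_alt lst
instance (lst : List Int) (out : Option Int) : Decidable (Spec_max_balanced_idx lst out) := by unfold Spec_max_balanced_idx; infer_instance

-- ===== CLAIM (what is proved, stated in full; the proofs are below) =====
def Claim_equal_max_balanced_idx : Prop := ∀ (lst : List Int), Dom_max_balanced_idx lst → Spec_max_balanced_idx lst (max_balanced_idx lst)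

-- ===== LEMMAS AND PROOFS =====

-- sum of the first i elements / product of the elements from position i on
def pvS (lst : List Int) (i : Nat) : Int := (lst.take i).sum
def pvP (lst : List Int) (i : Nat) : Int := (lst.drop i).prod

def pvBal (lst : List Int) (i : Nat) : Bool := pvS lst i == pvP lst (i + 1)

-- common reference function: the largest balanced index in [1, i], scanned downward
def pvFindDown (lst : List Int) : Nat → Option Nat
  | 0 => none
  | j + 1 => if pvBal lst (j + 1) then some (j + 1) else pvFindDown lst j

theorem pvFindDown_pos (lst : List Int) (i k : Nat) (h : pvFindDown lst i = some k) : 1 ≤ k := by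
  induction i with
  | zero => simp [pvFindDown] at h
  | succ j ih =>
    simp only [pvFindDown] at h
    split at h
    · cases h; omega
    · exact ih h

theorem foldl_add_eq (l : List Int) (a : Int) : l.foldl (fun t n => t + n) a = a + l.sum := by
  induction l generalizing a with
  | nil => simp
  | cons x xs ih => simp only [List.foldl_cons, ih (a + x), List.sum_cons]; ring

theorem foldl_mul_eq (l : List Int) (a : Int) : l.foldl (fun p n => p * n) a = a * l.prod := by
  induction l generalizing a with
  | nil => simp
  | cons x xs ih => simp only [List.foldl_cons, ih (a * x), List.prod_cons]; ring

theorem pvIsBalanced_eq (lst : List Int) (i : Nat) (h : i < lst.length) :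
    pvIsBalanced lst (i : Int) = some (pvBal lst i) := by
  have hp : ((i : Int) + 1) = ((i + 1 : Nat) : Int) := by omega
  simp only [pvIsBalanced, pvSumAll, hp, PySem.List.slice_to_natCast,
    PySem.List.slice_from_natCast]
  rw [if_neg (by omega)]
  simp [pvBal, pvS, pvP, foldl_add_eq, foldl_mul_eq]

-- A's forward loop, abstracted to Nat indices: it keeps the LAST balanced index seen
def pvChooseLast (lst : List Int) : List Nat → Nat → Nat
  | [], acc => acc
  | i :: rest, acc => pvChooseLast lst rest (if pvBal lst i then i else acc)

theorem pvLoopA_eq (lst : List Int) (idxs : List Nat) (acc : Nat)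
    (hlt : ∀ i ∈ idxs, i < lst.length) :
    pvLoopA lst (idxs.map (fun k : Nat => (k : Int))) (acc : Int) =
      (if pvChooseLast lst idxs acc ≠ 0 then some ((pvChooseLast lst idxs acc : Nat) : Int) else none) := by
  induction idxs generalizing acc with
  | nil =>
    simp only [List.map_nil, pvLoopA, pvChooseLast]
    by_cases h : acc = 0 <;> simp [h]
  | cons i rest ih =>
    have hi : i < lst.length := hlt i (by simp)
    simp only [List.map_cons, pvLoopA, pvIsBalanced_eq lst i hi, pvChooseLast]
    have hcast : (if pvBal lst i then ((i : Nat) : Int) else ((acc : Nat) : Int))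
        = (((if pvBal lst i then i else acc : Nat) : Nat) : Int) := by
      by_cases hb : pvBal lst i <;> simp [hb]
    rw [hcast, ih _ (fun j hj => hlt j (by simp [hj]))]

theorem pvChooseLast_append (lst : List Int) (l1 l2 : List Nat) (acc : Nat) :
    pvChooseLast lst (l1 ++ l2) acc = pvChooseLast lst l2 (pvChooseLast lst l1 acc) := by
  induction l1 generalizing acc with
  | nil => simp [pvChooseLast]
  | cons i rest ih => simp only [List.cons_append, pvChooseLast, ih]

theorem pvChooseLast_range' (lst : List Int) (m : Nat) :
    pvChooseLast lst (List.range' 1 m) 0 = (pvFindDown lst m).getD 0 := by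
  induction m with
  | zero => simp [pvChooseLast, pvFindDown]
  | succ j ih =>
    rw [List.range'_1_concat, pvChooseLast_append, ih]
    by_cases hb : pvBal lst (j + 1) <;>
      simp [pvChooseLast, pvFindDown, hb, Nat.add_comm 1 j]

theorem a_eq_findDown (lst : List Int) :
    max_balanced_idx lst = (pvFindDown lst (lst.length - 1)).map (fun k : Nat => (k : Int)) := by
  unfold max_balanced_idx
  cases hn : lst.length with
  | zero =>
    have h0 : PySem.List.pyRange 0 ((0 : Nat) : Int) 1 = [] := by
      rw [PySem.List.pyRange_zero_natCast]; simp
    rw [h0]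
    simp [pvLoopA, pvFindDown]
  | succ m =>
    rw [PySem.List.pyRange_zero_natCast]
    have hlt : ∀ i ∈ List.range (m + 1), i < lst.length := by
      intro i hi; rw [hn]; exact List.mem_range.mp hi
    have heq := pvLoopA_eq lst (List.range (m + 1)) 0 hlt
    simp only [Nat.cast_zero] at heq
    rw [heq]
    have hr : List.range (m + 1) = 0 :: List.range' 1 m := by
      simp [List.range_eq_range', List.range'_succ]
    rw [hr]
    simp only [pvChooseLast, ite_self]
    rw [pvChooseLast_range']
    have hm : m + 1 - 1 = m := rfl
    cases hf : pvFindDown lst m with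
    | none => simp [hm, hf]
    | some k =>
      have hk := pvFindDown_pos lst m k hf
      rw [hm, hf, Option.map_some]
      simp only [Option.getD_some]
      rw [if_pos (by omega)]

theorem prefix_getD (lst : List Int) (a : Int) (i : Nat) (h : i ≤ lst.length) :
    (pvPrefix a lst).getD i 0 = a + pvS lst i := by
  induction lst generalizing a i with
  | nil =>
    have hi : i = 0 := by simpa using h
    subst hi; simp [pvPrefix, pvS]
  | cons x xs ih =>
    cases i with
    | zero => simp [pvPrefix, pvS]
    | succ j =>
      simp only [pvPrefix, List.getD_cons_succ]
      rw [ih (a + x) j (by simpa using h)]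
      simp only [pvS, List.take_succ_cons, List.sum_cons]; ring

theorem pvLoopB_eq (lst : List Int) : ∀ i : Nat, i < lst.length →
    pvLoopB lst (pvPrefix 0 lst) i (pvP lst (i + 1)) =
      (pvFindDown lst i).map (fun k : Nat => (k : Int)) := by
  intro i
  induction i with
  | zero => intro _; simp [pvLoopB, pvFindDown]
  | succ j ih =>
    intro h
    simp only [pvLoopB, pvFindDown]
    rw [prefix_getD lst 0 (j + 1) (by omega), zero_add]
    by_cases hb : pvS lst (j + 1) = pvP lst (j + 1 + 1)
    · rw [if_pos hb]
      have : pvBal lst (j + 1) = true := by simp [pvBal, hb]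
      rw [this]
      simp
    · rw [if_neg hb]
      have : pvBal lst (j + 1) = false := by simp [pvBal, hb]
      rw [this]
      have hget : lst.getD (j + 1) 0 = lst[j + 1]'h := List.getD_eq_getElem lst 0 h
      have hP : pvP lst (j + 1 + 1) * lst.getD (j + 1) 0 = pvP lst (j + 1) := by
        rw [hget]
        simp only [pvP, List.drop_eq_getElem_cons h, List.prod_cons]
        ring
      rw [hP]
      exact ih (by omega)

theorem b_eq_findDown (lst : List Int) :
    max_balanced_idx_alt lst = (pvFindDown lst (lst.length - 1)).map (fun k : Nat => (k : Int)) := by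
  unfold max_balanced_idx_alt
  cases lst with
  | nil => simp [pvLoopB, pvFindDown]
  | cons x xs =>
    have hlen : (x :: xs).length - 1 = xs.length := by simp
    have h1 : pvP (x :: xs) (((x :: xs).length - 1) + 1) = 1 := by
      rw [hlen]
      simp [pvP]
    have := pvLoopB_eq (x :: xs) ((x :: xs).length - 1) (by simp)
    rw [h1] at this
    exact this

-- ===== VERDICT (by name: the statement is the Claim_ definition above) =====
theorem max_balanced_idx_spec : Claim_equal_max_balanced_idx := by
  intro lst _
  unfold Spec_max_balanced_idx
  rw [a_eq_findDown, b_eq_findDown]
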